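-- pv_equiv track=rewrite | github.com/ictin/CognitiveRAG | CognitiveRAG/crag/corpus/chunkers.py | _window_with_overlap
-- ===== SOURCE A (Python) =====
-- from typing import Any, Dict, List, Tuple
--
-- def _window_with_overlap(length: int, chunk_size: int, chunk_overlap: int) -> List[Tuple[int, int]]:
--     ranges: List[Tuple[int, int]] = []
--     start = 0
--     step = max(1, int(chunk_size) - int(chunk_overlap))
--     while start < length:
--         end = min(length, start + int(chunk_size))
--         ranges.append((start, end))
--         if end >= length:
--             break
--         start += step
--     return ranges
-- ===== SOURCE B (Python) =====
-- def _window_with_overlap(length, chunk_size, chunk_overlap):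
--     cs = int(chunk_size)
--     step = max(1, cs - int(chunk_overlap))
--     if length <= 0:
--         return []
--     total = -((-length) // step)                 # ceil(length/step): all starts < length
--     cover = max(0, -((-(length - cs)) // step))  # first start with start+cs >= length
--     n = min(total, cover + 1)
--     return [(i * step, min(length, i * step + cs)) for i in range(n)]
-- ===== Notes on version B (the rewrite author's own statement) =====
-- stated objective: alternative
-- what changed: Replaces the while-loop with early break by a closed-form window count (ceiling divisions) and a single range comprehension producing the (start,end) pairs arithmetically.
import Mathlib
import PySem

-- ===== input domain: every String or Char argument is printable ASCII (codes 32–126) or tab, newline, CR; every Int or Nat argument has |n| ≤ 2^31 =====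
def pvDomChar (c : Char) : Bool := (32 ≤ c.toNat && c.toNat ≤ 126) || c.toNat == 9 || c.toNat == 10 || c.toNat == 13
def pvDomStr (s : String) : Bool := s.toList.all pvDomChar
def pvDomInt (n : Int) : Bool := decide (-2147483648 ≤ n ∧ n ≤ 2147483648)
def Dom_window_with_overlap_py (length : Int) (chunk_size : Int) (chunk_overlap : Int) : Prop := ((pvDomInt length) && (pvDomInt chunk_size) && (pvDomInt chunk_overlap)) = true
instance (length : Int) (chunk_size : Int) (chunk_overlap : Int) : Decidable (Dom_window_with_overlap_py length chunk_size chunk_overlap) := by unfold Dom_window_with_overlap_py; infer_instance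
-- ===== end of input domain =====

-- B replaces A's while-loop (with its in-loop break) by a closed-form window count
-- (ceiling divisions) and a range comprehension; same return value (objective: alternative).

-- ===== PORT A =====
-- A's while-loop as structural recursion on start; the Python hoists step = max(1, cs-co)
-- before the loop, so here the hoisted difference d = cs-co is the parameter, clamped once.
def windowGoA (length chunk_size d : Int) (start : Int) : List (Int × Int) :=
  let step := max 1 d
  if _h : start < length then
    let e := min length (start + chunk_size)
    if length ≤ e then [(start, e)]
    else (start, e) :: windowGoA length chunk_size d (start + step)
  else []
termination_by (length - start).toNat
decreasing_by omega

def window_with_overlap_py (length : Int) (chunk_size : Int) (chunk_overlap : Int) : List (Int × Int) :=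
  windowGoA length chunk_size (chunk_size - chunk_overlap) 0

-- ===== PORT B =====
def window_with_overlap_py_alt (length : Int) (chunk_size : Int) (chunk_overlap : Int) : List (Int × Int) :=
  let cs := chunk_size
  let step := max 1 (cs - chunk_overlap)
  if length ≤ 0 then []
  else
    let total := -(PySem.Int.floordiv (-length) step)
    let cover := max 0 (-(PySem.Int.floordiv (-(length - cs)) step))
    let n := min total (cover + 1)
    (PySem.List.pyRange 0 n 1).map (fun i => (i * step, min length (i * step + cs)))

-- ===== PRECONDITION & SPEC =====
def Spec_window_with_overlap_py (length : Int) (chunk_size : Int) (chunk_overlap : Int) (out : List (Int × Int)) : Prop := out = window_with_overlap_py_alt length chunk_size chunk_overlap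
instance (length : Int) (chunk_size : Int) (chunk_overlap : Int) (out : List (Int × Int)) : Decidable (Spec_window_with_overlap_py length chunk_size chunk_overlap out) := by unfold Spec_window_with_overlap_py; infer_instance

-- ===== CLAIM (what is proved, stated in full; the proofs are below) =====
def Claim_equal_window_with_overlap_py : Prop := ∀ (length : Int) (chunk_size : Int) (chunk_overlap : Int), Dom_window_with_overlap_py length chunk_size chunk_overlap → Spec_window_with_overlap_py length chunk_size chunk_overlap (window_with_overlap_py length chunk_size chunk_overlap)

-- ===== LEMMAS AND PROOFS =====

-- B's body with the clamped step as a parameter (proof-only helper).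
def altCore (L cs step : Int) : List (Int × Int) :=
  if L ≤ 0 then []
  else
    let total := -(PySem.Int.floordiv (-L) step)
    let cover := max 0 (-(PySem.Int.floordiv (-(L - cs)) step))
    let n := min total (cover + 1)
    (PySem.List.pyRange 0 n 1).map (fun i => (i * step, min L (i * step + cs)))

theorem alt_eq_altCore (L cs co : Int) :
    window_with_overlap_py_alt L cs co = altCore L cs (max 1 (cs - co)) := rfl

-- Shifting the start: the loop from `start` is the loop from 0 on the remaining length,
-- translated by `start`.
theorem windowGoA_shift (cs d : Int) : ∀ (n : Nat) (L start : Int), (L - start).toNat ≤ n →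
    windowGoA L cs d start
      = (windowGoA (L - start) cs d 0).map (fun p => (p.1 + start, p.2 + start)) := by
  intro n
  induction n with
  | zero =>
    intro L start h
    rw [windowGoA]; simp only
    rw [dif_neg (show ¬ start < L by omega)]
    rw [windowGoA]; simp only
    rw [dif_neg (show ¬ (0:Int) < L - start by omega)]
    simp
  | succ n ih =>
    intro L start h
    rw [windowGoA]; simp only
    by_cases hlt : start < L
    · rw [dif_pos hlt]
      conv_rhs => rw [windowGoA]
      simp only
      rw [dif_pos (show (0:Int) < L - start by omega)]
      by_cases hbrk : L ≤ min L (start + cs)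
      · rw [if_pos hbrk, if_pos (show L - start ≤ min (L - start) (0 + cs) by omega)]
        simp only [List.map]
        have h1 : min L (start + cs) = min (L - start) (0 + cs) + start := by omega
        rw [h1]; simp
      · rw [if_neg hbrk, if_neg (show ¬ L - start ≤ min (L - start) (0 + cs) by omega)]
        have h1 : windowGoA L cs d (start + max 1 d)
            = (windowGoA (L - (start + max 1 d)) cs d 0).map
                (fun p => (p.1 + (start + max 1 d), p.2 + (start + max 1 d))) :=
          ih L (start + max 1 d) (by omega)
        have h2 : windowGoA (L - start) cs d (0 + max 1 d)
            = (windowGoA (L - start - max 1 d) cs d 0).map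
                (fun p => (p.1 + max 1 d, p.2 + max 1 d)) := by
          have := ih (L - start) (max 1 d) (by omega)
          simpa using this
        rw [h1, h2, List.map_cons, List.map_map]
        have hL : L - (start + max 1 d) = L - start - max 1 d := by ring
        rw [hL]
        have hhd : min L (start + cs) = min (L - start) (0 + cs) + start := by omega
        rw [hhd]
        congr 1
        · simp
        · congr 1
          funext p
          simp [Function.comp]
          constructor <;> ring
    · rw [dif_neg hlt]
      rw [windowGoA]; simp only
      rw [dif_neg (show ¬ (0:Int) < L - start by omega)]
      simp

-- bracket helpers for the ceiling division
theorem ceil_pos_of (m t L : Int) (hm : 1 ≤ m) (h : L ≤ t * m) (hL : 0 < L) : 1 ≤ t := by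
  nlinarith

theorem ceil_nonpos_of (m c x : Int) (hm : 1 ≤ m) (h : (c - 1) * m < x) (hx : x ≤ 0) : c ≤ 0 := by
  nlinarith

-- the comprehension's tail is the shifted comprehension over the shorter length
theorem map_tail_shift (L cs m nn' : Int) :
    (PySem.List.pyRange 1 (nn' + 1) 1).map (fun i => (i * m, min L (i * m + cs)))
      = ((PySem.List.pyRange 0 nn' 1).map (fun i => (i * m, min (L - m) (i * m + cs)))).map
          (fun p => (p.1 + m, p.2 + m)) := by
  rw [List.map_map, PySem.List.pyRange_one, PySem.List.pyRange_one, List.map_map, List.map_map]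
  have hlen : (nn' + 1 - 1).toNat = (nn' - 0).toNat := by omega
  rw [hlen]
  apply List.map_congr_left
  intro k _
  simp only [Function.comp]
  refine Prod.ext ?_ ?_
  · simp; ring
  · show min L ((1 + (k : Int)) * m + cs) = min (L - m) ((0 + (k : Int)) * m + cs) + m
    have h : (1 + (k : Int)) * m + cs = ((0 : Int) + (k : Int)) * m + cs + m := by ring
    rw [h]
    generalize ((0 : Int) + (k : Int)) * m + cs = x
    omega

theorem window_main (cs d : Int) : ∀ (n : Nat) (L : Int), L.toNat ≤ n →
    windowGoA L cs d 0 = altCore L cs (max 1 d) := by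
  intro n
  induction n with
  | zero =>
    intro L h
    rw [windowGoA]; simp only
    rw [dif_neg (show ¬ (0:Int) < L by omega)]
    rw [altCore, if_pos (show L ≤ 0 by omega)]
  | succ n ih =>
    intro L h
    set m : Int := max 1 d with hmdef
    have hm : 1 ≤ m := le_max_left 1 d
    by_cases hL : L ≤ 0
    · rw [windowGoA]; simp only
      rw [dif_neg (show ¬ (0:Int) < L by omega)]
      rw [altCore, if_pos hL]
    · have hLpos : 0 < L := by omega
      rw [altCore, if_neg hL]
      simp only
      set t : Int := -(PySem.Int.floordiv (-L) m) with htdef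
      set c : Int := -(PySem.Int.floordiv (-(L - cs)) m) with hcdef
      have ht := (PySem.Int.neg_floordiv_neg_eq_iff_of_pos (a := L) (b := m)
        (show (0:Int) < m by omega)).mp htdef.symm
      have hc := (PySem.Int.neg_floordiv_neg_eq_iff_of_pos (a := L - cs) (b := m)
        (show (0:Int) < m by omega)).mp hcdef.symm
      have ht1 : 1 ≤ t := ceil_pos_of m t L hm ht.2 hLpos
      rw [windowGoA]; simp only
      rw [dif_pos hLpos]
      by_cases hbrk : L ≤ min L (0 + cs)
      · -- one window: L ≤ cs, so cover = 0 and n = 1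
        rw [if_pos hbrk]
        have hcle : c ≤ 0 := ceil_nonpos_of m c (L - cs) hm hc.1 (by omega)
        have hn1 : min t (max 0 c + 1) = 1 := by omega
        have hr : PySem.List.pyRange 0 1 1 = [0] := by decide
        rw [hn1, hr]
        simp only [List.map]
        refine congrArg₂ _ (Prod.ext (by simp) ?_) rfl
        show min L (0 + cs) = min L (0 * m + cs)
        have h0 : (0:Int) * m + cs = 0 + cs := by ring
        rw [h0]
      · -- cs < L: recurse
        rw [if_neg hbrk]
        have hcsL : cs < L := by omega
        have hc1 : 1 ≤ c := ceil_pos_of m c (L - cs) hm hc.2 (by omega)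
        have hshift := windowGoA_shift cs d (L - m).toNat L m (le_rfl)
        rw [← hmdef]
        simp only [zero_add]
        rw [hshift]
        by_cases hLm : L - m ≤ 0
        · -- the loop stops after this window; n = 1 since L ≤ m
          rw [windowGoA]; simp only
          rw [dif_neg (show ¬ (0:Int) < L - m by omega)]
          have ht1' : t = 1 := by
            rw [htdef]
            refine (PySem.Int.neg_floordiv_neg_eq_iff_of_pos (show (0:Int) < m by omega)).mpr ?_
            constructor
            · nlinarith
            · nlinarith
          have hn1 : min t (max 0 c + 1) = 1 := by omega
          have hr : PySem.List.pyRange 0 1 1 = [0] := by decide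
          rw [hn1, hr]
          simp only [List.map]
          refine congrArg₂ _ (Prod.ext (by simp) ?_) rfl
          show min L cs = min L (0 * m + cs)
          have h0 : (0:Int) * m + cs = cs := by ring
          rw [h0]
        · -- 0 < L - m: apply the induction hypothesis to the shorter length
          have hrec : windowGoA (L - m) cs d 0 = altCore (L - m) cs m := by
            apply ih
            omega
          rw [hrec, altCore, if_neg (show ¬ L - m ≤ 0 by omega)]
          simp only
          set t' : Int := -(PySem.Int.floordiv (-(L - m)) m) with ht'def
          set c' : Int := -(PySem.Int.floordiv (-(L - m - cs)) m) with hc'def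
          have ht' := (PySem.Int.neg_floordiv_neg_eq_iff_of_pos (a := L - m) (b := m)
            (show (0:Int) < m by omega)).mp ht'def.symm
          have hc' := (PySem.Int.neg_floordiv_neg_eq_iff_of_pos (a := L - m - cs) (b := m)
            (show (0:Int) < m by omega)).mp hc'def.symm
          -- t = t' + 1 and c = c' + 1
          have htt : t = t' + 1 := by
            have h1 : (t' + 1 - 1) * m < L := by nlinarith [ht'.1]
            have h2 : L ≤ (t' + 1) * m := by nlinarith [ht'.2]
            have := (PySem.Int.neg_floordiv_neg_eq_iff_of_pos (a := L) (b := m)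
              (show (0:Int) < m by omega)).mpr ⟨h1, h2⟩
            omega
          have hcc : c = c' + 1 := by
            have h1 : (c' + 1 - 1) * m < L - cs := by nlinarith [hc'.1]
            have h2 : L - cs ≤ (c' + 1) * m := by nlinarith [hc'.2]
            have := (PySem.Int.neg_floordiv_neg_eq_iff_of_pos (a := L - cs) (b := m)
              (show (0:Int) < m by omega)).mpr ⟨h1, h2⟩
            omega
          have hnn : min t (max 0 c + 1) = min t' (max 0 c' + 1) + 1 := by omega
          rw [hnn]
          rw [PySem.List.pyRange_one_cons (show (0:Int) < min t' (max 0 c' + 1) + 1 by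
            have : 1 ≤ t' := ceil_pos_of m t' (L - m) hm ht'.2 (by omega)
            omega)]
          rw [List.map_cons, show (0:Int) + 1 = 1 from by ring,
            map_tail_shift L cs m (min t' (max 0 c' + 1))]
          refine congrArg₂ _ (Prod.ext (by simp) ?_) rfl
          show min L cs = min L (0 * m + cs)
          have h0 : (0:Int) * m + cs = cs := by ring
          rw [h0]

-- ===== VERDICT (by name: the statement is the Claim_ definition above) =====
theorem window_with_overlap_py_spec : Claim_equal_window_with_overlap_py := by
  intro length cs co _
  unfold Spec_window_with_overlap_py window_with_overlap_py
  rw [alt_eq_altCore]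
  exact window_main cs (cs - co) length.toNat length le_rfl
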